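-- pv_equiv track=rewrite | github.com/Rahwbahwdawhb/Advent-of-Code | AOC-2023/Day 11/Day11.py | addEmptySpaceAndTranspose
-- ===== SOURCE A (Python) =====
-- def addEmptySpaceAndTranspose(spaceMap):
--     mapList=spaceMap.split('\n')
--     rowLength=len(mapList[0])
--     newMapListList=[]
--     for row in mapList:
--         emptySpaceSum=0
--         for ch in row:
--             if ch=='.':
--                 emptySpaceSum+=1
--         rowList=list(row)
--         newMapListList.append(rowList)
--         if emptySpaceSum==rowLength:
--             newMapListList.append(rowList)
--     newMapListList2=list(map(list,zip(*newMapListList)))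
--     newSpaceMap=''
--     for row in newMapListList2:
--         newSpaceMap+=''.join(row)+'\n'
--     newSpaceMap=newSpaceMap[:-1]
--     return newSpaceMap,newMapListList2
-- ===== SOURCE B (Python) =====
-- def addEmptySpaceAndTranspose(spaceMap):
--     rows = spaceMap.split('\n')
--     rowLength = len(rows[0])
--     flags = [row.count('.') == rowLength for row in rows]
--     width = min(len(r) for r in rows)
--     cols = []
--     for j in range(width):
--         col = []
--         for r, f in zip(rows, flags):
--             col.append(r[j])
--             if f:
--                 col.append(r[j])
--         cols.append(col)
--     return '\n'.join(''.join(c) for c in cols), cols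
-- ===== Notes on version B (the rewrite author's own statement) =====
-- stated objective: alternative
-- what changed: B builds the transposed result directly column-major (one pass per column over the original rows, using a per-row empty-flag and the minimum row length) instead of constructing the expanded list of duplicated rows and transposing it with zip(*...); the final string is assembled with a newline join instead of repeated concatenation and a trailing-newline slice.
import Mathlib
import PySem

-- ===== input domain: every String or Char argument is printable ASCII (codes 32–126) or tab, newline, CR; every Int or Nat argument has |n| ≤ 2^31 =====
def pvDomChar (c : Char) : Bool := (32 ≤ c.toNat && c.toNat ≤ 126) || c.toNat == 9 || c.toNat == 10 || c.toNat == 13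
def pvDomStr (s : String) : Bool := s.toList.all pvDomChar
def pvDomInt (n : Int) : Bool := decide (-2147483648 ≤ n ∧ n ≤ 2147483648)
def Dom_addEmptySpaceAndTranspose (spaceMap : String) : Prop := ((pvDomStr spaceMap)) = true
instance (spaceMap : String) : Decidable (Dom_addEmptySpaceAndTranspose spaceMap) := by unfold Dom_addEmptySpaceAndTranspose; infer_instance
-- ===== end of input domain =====

-- B rebuilds the transposed map column-major (one boolean flag per row, no expanded
-- list-of-rows, no zip transpose) — objective: alternative decomposition, same asymptotic cost.


-- ===== PORT A =====

-- termination helper for pvZipStar (cited by its decreasing_by)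
theorem pvSumTailLe (ls : List (List String)) :
    ((ls.map (fun l => l.tail)).map List.length).sum ≤ (ls.map List.length).sum := by
  induction ls with
  | nil => simp
  | cons l t ih =>
      simp only [List.map_cons, List.sum_cons, List.length_tail]
      omega

theorem pvSumTailLt (ls : List (List String)) (hne : ls ≠ [])
    (hall : ¬ ls.any (fun l => l.isEmpty) = true) :
    ((ls.map (fun l => l.tail)).map List.length).sum < (ls.map List.length).sum := by
  cases ls with
  | nil => exact absurd rfl hne
  | cons l t =>
      simp only [Bool.not_eq_true, List.any_cons, Bool.or_eq_false_iff,
        List.isEmpty_eq_false_iff] at hall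
      have hl : l ≠ [] := hall.1
      have hlen : 0 < l.length := List.length_pos_iff.mpr hl
      have := pvSumTailLe t
      simp only [List.map_cons, List.sum_cons, List.length_tail]
      omega

-- hand port of Python's zip(*lists) (then map(list, ·)): truncates to the shortest list
def pvZipStar (ls : List (List String)) : List (List String) :=
  if h : ls.isEmpty || ls.any (fun l => l.isEmpty) then []
  else (ls.map (fun l => l.headD "")) :: pvZipStar (ls.map (fun l => l.tail))
termination_by (ls.map List.length).sum
decreasing_by
  rw [Bool.or_eq_true, not_or] at h
  simpa using pvSumTailLt ls (by simpa [List.isEmpty_eq_false_iff] using h.1)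
    h.2

-- the body of A after `mapList = spaceMap.split('\n')` (mapList[0]: split never returns [])
def pvACore (mapList : List String) : String × List (List String) :=
  let rowLength : Int := PySem.Str.len (mapList.headD "")
  let newMapListList := mapList.foldl (fun acc row =>
      let emptySpaceSum : Int :=
        row.toList.foldl (fun n ch => if ch = '.' then n + 1 else n) 0
      let rowList := row.toList.map (fun c => String.ofList [c])
      let acc2 := acc ++ [rowList]
      if emptySpaceSum = rowLength then acc2 ++ [rowList] else acc2) []
  let newMapListList2 := pvZipStar newMapListList
  let newSpaceMap := newMapListList2.foldl
      (fun s row => s ++ PySem.Str.join "" row ++ "\n") ""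
  (PySem.Str.slice newSpaceMap none (some (-1)), newMapListList2)

def addEmptySpaceAndTranspose (spaceMap : String) : String × List (List String) :=
  pvACore ((PySem.Str.split? spaceMap "\n").getD [])

-- ===== PORT B =====

-- the body of B after `rows = spaceMap.split('\n')`
def pvBCore (rows : List String) : String × List (List String) :=
  let rowLength : Int := PySem.Str.len (rows.headD "")
  let flags := rows.map (fun row => decide ((PySem.Str.count row "." : Int) = rowLength))
  let width : Int :=
    match rows.map PySem.Str.len with
    | [] => 0                          -- unreachable: split('\n') is never empty
    | w :: ws => ws.foldl min w
  let cols := (PySem.List.pyRange 0 width 1).foldl (fun cols j =>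
      let col := (rows.zip flags).foldl (fun col rf =>
          let cell := String.ofList [((PySem.Str.pyGet? rf.1 j).getD ' ')]
          let col2 := col ++ [cell]
          if rf.2 then col2 ++ [cell] else col2) []
      cols ++ [col]) []
  (PySem.Str.join "\n" (cols.map (fun c => PySem.Str.join "" c)), cols)

def addEmptySpaceAndTranspose_alt (spaceMap : String) : String × List (List String) :=
  pvBCore ((PySem.Str.split? spaceMap "\n").getD [])

-- ===== PRECONDITION & SPEC =====
def Spec_addEmptySpaceAndTranspose (spaceMap : String) (out : String × List (List String)) : Prop := out = addEmptySpaceAndTranspose_alt spaceMap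
instance (spaceMap : String) (out : String × List (List String)) : Decidable (Spec_addEmptySpaceAndTranspose spaceMap out) := by unfold Spec_addEmptySpaceAndTranspose; infer_instance

-- ===== CLAIM (what is proved, stated in full; the proofs are below) =====
def Claim_equal_addEmptySpaceAndTranspose : Prop := ∀ (spaceMap : String), Dom_addEmptySpaceAndTranspose spaceMap → Spec_addEmptySpaceAndTranspose spaceMap (addEmptySpaceAndTranspose spaceMap)

-- ===== LEMMAS AND PROOFS =====

-- proof-side helpers
def pvCl (row : String) : List String := row.toList.map (fun c => String.ofList [c])

def pvMinW : List (List String) → Nat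
  | [] => 0
  | l :: t => t.foldl (fun m x => min m x.length) l.length

theorem pvFoldlMin_le (t : List Nat) (a : Nat) :
    t.foldl min a ≤ a ∧ ∀ x ∈ t, t.foldl min a ≤ x := by
  induction t generalizing a with
  | nil => simp
  | cons x t ih =>
      obtain ⟨h1, h2⟩ := ih (min a x)
      refine ⟨le_trans h1 (min_le_left _ _), ?_⟩
      intro y hy
      rw [List.mem_cons] at hy
      rcases hy with rfl | hy
      · exact le_trans h1 (min_le_right _ _)
      · exact h2 _ hy

theorem pvLe_foldlMin (t : List Nat) (a n : Nat) :
    n ≤ t.foldl min a ↔ n ≤ a ∧ ∀ x ∈ t, n ≤ x := by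
  induction t generalizing a with
  | nil => simp
  | cons x t ih =>
      simp only [List.foldl_cons, ih, le_min_iff, List.mem_cons]
      constructor
      · rintro ⟨⟨h1, h2⟩, h3⟩
        refine ⟨h1, ?_⟩
        rintro y (rfl | hy)
        · exact h2
        · exact h3 y hy
      · rintro ⟨h1, h2⟩
        exact ⟨⟨h1, h2 x (Or.inl rfl)⟩, fun y hy => h2 y (Or.inr hy)⟩

theorem pvFoldlMin_pred (t : List Nat) (a : Nat) :
    (t.map (fun x => x - 1)).foldl min (a - 1) = t.foldl min a - 1 := by
  induction t generalizing a with
  | nil => simp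
  | cons x t ih =>
      simp only [List.map_cons, List.foldl_cons]
      rw [show min (a - 1) (x - 1) = min a x - 1 by omega, ih]

theorem pvFoldlMin_cast (t : List Nat) (a : Nat) :
    ((t.foldl min a : Nat) : Int) = (t.map (fun x : Nat => (x : Int))).foldl min (a : Int) := by
  induction t generalizing a with
  | nil => simp
  | cons x t ih =>
      simp only [List.map_cons, List.foldl_cons, ← Nat.cast_min, ih]

theorem pvGetD_zero (l : List String) : l.getD 0 "" = l.headD "" := by
  cases l <;> rfl

theorem pvZipStar_eq (ls : List (List String)) :
    pvZipStar ls = (List.range (pvMinW ls)).map (fun j => ls.map (fun l => l.getD j "")) := by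
  rw [pvZipStar]
  by_cases h : ls.isEmpty || ls.any (fun l => l.isEmpty)
  · rw [dif_pos h]
    rw [Bool.or_eq_true] at h
    rcases h with h | h
    · rw [List.isEmpty_iff] at h
      subst h; simp [pvMinW]
    · rw [List.any_eq_true] at h
      obtain ⟨x, hx, hxe⟩ := h
      rw [List.isEmpty_iff] at hxe
      subst hxe
      cases ls with
      | nil => simp at hx
      | cons l t =>
          have hz : pvMinW (l :: t) = 0 := by
            rw [List.mem_cons] at hx
            rcases hx with hx | hx
            · have h0 := (pvFoldlMin_le (t.map List.length) l.length).1
              simp only [pvMinW, ← List.foldl_map (f := List.length) (g := min)]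
              rw [← hx] at h0 ⊢
              simpa using h0
            · have := (pvFoldlMin_le (t.map List.length) l.length).2 0
                (List.mem_map.mpr ⟨[], hx, rfl⟩)
              simp only [pvMinW, ← List.foldl_map (f := List.length) (g := min)]
              omega
          rw [hz]; simp
  · rw [dif_neg h]
    rw [Bool.or_eq_true, not_or] at h
    obtain ⟨hne', hall0⟩ := h
    have hne : ls ≠ [] := by simpa [List.isEmpty_iff] using hne'
    have hall : ∀ x ∈ ls, x.isEmpty = false := by
      intro x hx
      rcases Bool.eq_false_or_eq_true x.isEmpty with hb | hb
      · exact absurd (List.any_eq_true.mpr ⟨x, hx, hb⟩) hall0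
      · exact hb
    cases ls with
    | nil => exact absurd rfl hne
    | cons l t =>
        have hpos : 1 ≤ pvMinW (l :: t) := by
          simp only [pvMinW, ← List.foldl_map (f := List.length) (g := min)]
          rw [pvLe_foldlMin]
          constructor
          · have := hall l (by simp)
            simp only [List.isEmpty_eq_false_iff] at this
            exact List.length_pos_iff.mpr this
          · intro x hx
            simp only [List.mem_map] at hx
            obtain ⟨y, hy, rfl⟩ := hx
            have := hall y (by simp [hy])
            simp only [List.isEmpty_eq_false_iff] at this
            exact List.length_pos_iff.mpr this
        obtain ⟨m, hm⟩ : ∃ m, pvMinW (l :: t) = m + 1 :=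
          ⟨pvMinW (l :: t) - 1, by omega⟩
        have hmt : pvMinW ((l :: t).map (fun l => l.tail)) = m := by
          show (t.map (fun l => l.tail)).foldl (fun m x => min m x.length) l.tail.length = m
          rw [← List.foldl_map (f := List.length) (g := min)]
          have h1 : (t.map (fun l => l.tail)).map List.length
              = (t.map List.length).map (fun x => x - 1) := by
            simp [List.map_map, Function.comp_def]
          rw [h1, List.length_tail, pvFoldlMin_pred]
          rw [show pvMinW (l :: t) = (t.map List.length).foldl min l.length from by
            simp [pvMinW, ← List.foldl_map (f := List.length) (g := min)]] at hm
          omega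
        rw [pvZipStar_eq ((l :: t).map (fun l => l.tail)), hmt, hm,
          List.range_succ_eq_map]
        simp only [List.map_cons, List.map_map]
        congr 1
        · have := List.map_congr_left (l := l :: t)
            (f := fun a => List.headD a "") (g := fun a => List.getD a 0 "")
            (fun a _ => (pvGetD_zero a).symm)
          simpa using this
        · apply List.map_congr_left
          intro j _
          simp [Function.comp_def, Nat.succ_eq_add_one]
termination_by (ls.map List.length).sum
decreasing_by
  simpa using pvSumTailLt _ hne hall0

-- the per-row group of the expanded map: the row once, twice if its '.'-count equals rowLength
def pvGrp (R : Int) (r : String) : List (List String) :=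
  if (PySem.Str.count r "." : Int) = R then [pvCl r, pvCl r] else [pvCl r]

-- the minimum row length of the original rows (what zip truncates to)
def pvWN : List String → Nat
  | [] => 0
  | r :: t => t.foldl (fun m x => min m x.toList.length) r.toList.length

theorem pvCountGo (c : Char) (fuel : Nat) (l : List Char) (acc : Nat)
    (h : l.length ≤ fuel) :
    PySem.Chars.count.go [c] fuel l acc = acc + l.countP (fun ch => ch == c) := by
  induction fuel generalizing l acc with
  | zero =>
      have hl : l = [] := List.eq_nil_of_length_eq_zero (Nat.le_zero.mp h)
      subst hl
      simp [PySem.Chars.count.go]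
  | succ fuel ih =>
      cases l with
      | nil => simp [PySem.Chars.count.go]
      | cons x t =>
          rw [PySem.Chars.count.go]
          have hpre : List.isPrefixOf [c] (x :: t) = (c == x) := by
            simp [List.isPrefixOf]
          rw [hpre]
          by_cases hc : c = x
          · subst hc
            rw [if_pos (by simp)]
            simp only [List.length_cons] at h
            rw [show List.drop [c].length (c :: t) = t from rfl]
            rw [ih t (acc + 1) (by omega)]
            simp
            omega
          · rw [if_neg (by simpa using hc)]
            simp only [List.length_cons] at h
            rw [ih t acc (by omega)]
            have : (x == c) = false := by simpa using fun hh => hc hh.symm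
            simp [this]

theorem pvCountEq (row : String) :
    ((PySem.Str.count row "." : Nat) : Int)
      = row.toList.foldl (fun n ch => if ch = '.' then n + 1 else n) 0 := by
  rw [show (fun (n : Int) (ch : Char) => if ch = '.' then n + 1 else n)
      = (fun (n : Int) (ch : Char) => if (ch == '.') = true then n + 1 else n) from by
    funext n ch
    by_cases hch : ch = '.' <;> simp [hch]]
  rw [PySem.List.foldl_count_if]
  rw [PySem.Str.count_eq]
  show ((PySem.Chars.count row.toList ['.'] : Nat) : Int) = _
  rw [PySem.Chars.count]
  simp only [List.isEmpty_cons]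
  rw [pvCountGo '.' row.toList.length row.toList 0 le_rfl]
  have : row.toList.countP (fun ch => ch == '.')
      = row.toList.countP (fun ch => decide (ch = '.')) := by
    apply List.countP_congr
    intro ch _
    simp
  rw [this]
  simp

theorem pvFoldFlat (R : Int) (t : List String) (a : Nat) :
    ((t.flatMap (pvGrp R)).foldl (fun m x => min m x.length) a)
      = t.foldl (fun m r => min m r.toList.length) a := by
  induction t generalizing a with
  | nil => rfl
  | cons r t ih =>
      rw [List.flatMap_cons, List.foldl_append]
      rw [show (pvGrp R r).foldl (fun m x => min m x.length) a = min a r.toList.length from by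
        unfold pvGrp
        split
        · show min (min a (pvCl r).length) (pvCl r).length = _
          have : (pvCl r).length = r.toList.length := by simp [pvCl]
          rw [this]; omega
        · show min a (pvCl r).length = _
          have : (pvCl r).length = r.toList.length := by simp [pvCl]
          rw [this]]
      exact ih _

theorem pvMinW_flat (R : Int) (rows : List String) :
    pvMinW (rows.flatMap (pvGrp R)) = pvWN rows := by
  cases rows with
  | nil => rfl
  | cons r t =>
      rw [List.flatMap_cons]
      unfold pvGrp
      split
      · show pvMinW (pvCl r :: pvCl r :: t.flatMap (pvGrp R)) = _
        show (pvCl r :: t.flatMap (pvGrp R)).foldl (fun m x => min m x.length) (pvCl r).length = _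
        rw [List.foldl_cons, min_self, pvFoldFlat]
        simp [pvWN, pvCl]
      · show pvMinW (pvCl r :: t.flatMap (pvGrp R)) = _
        show (t.flatMap (pvGrp R)).foldl (fun m x => min m x.length) (pvCl r).length = _
        rw [pvFoldFlat]
        simp [pvWN, pvCl]

theorem pvWN_le (rows : List String) (r : String) (h : r ∈ rows) :
    pvWN rows ≤ r.toList.length := by
  cases rows with
  | nil => simp at h
  | cons x t =>
      show t.foldl (fun m x => min m x.toList.length) x.toList.length ≤ _
      rw [← List.foldl_map (f := fun s : String => s.toList.length) (g := min)]
      rw [List.mem_cons] at h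
      rcases h with rfl | h
      · exact (pvFoldlMin_le _ _).1
      · exact (pvFoldlMin_le _ _).2 _ (List.mem_map.mpr ⟨r, h, rfl⟩)

theorem pvClGet (r : String) (j : Nat) (h : j < r.toList.length) :
    (pvCl r)[j]?.getD "" = String.ofList [(r.toList[j]?).getD ' '] := by
  simp [pvCl, List.getElem?_map, List.getElem?_eq_getElem h]

theorem pvFoldlStrToList (cols : List (List String)) (init : String) :
    (cols.foldl (fun s row => s ++ PySem.Str.join "" row ++ "\n") init).toList
      = init.toList ++ cols.flatMap (fun row => (PySem.Str.join "" row).toList ++ ['\n']) := by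
  induction cols generalizing init with
  | nil => simp
  | cons p t ih =>
      rw [List.foldl_cons, ih]
      simp [String.toList_append]

theorem pvDropJoin {α : Type} (g : α → List Char) (ps : List α) :
    (ps.flatMap (fun p => g p ++ ['\n'])).dropLast = PySem.Chars.join ['\n'] (ps.map g) := by
  induction ps with
  | nil => simp [PySem.Chars.join_nil]
  | cons p t ih =>
      cases t with
      | nil => simp [PySem.Chars.join_singleton]
      | cons q u =>
          rw [List.flatMap_cons, List.map_cons, List.map_cons, PySem.Chars.join_cons_cons,
            List.dropLast_append_of_ne_nil (by simp)]
          rw [List.map_cons] at ih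
          rw [ih]

theorem pvStr (cols : List (List String)) :
    PySem.Str.slice (cols.foldl (fun s row => s ++ PySem.Str.join "" row ++ "\n") "") none (some (-1))
      = PySem.Str.join "\n" (cols.map (fun c => PySem.Str.join "" c)) := by
  rw [← String.toList_inj, PySem.Str.slice_to_neg_one, pvFoldlStrToList,
    PySem.Str.toList_join]
  rw [show ("" : String).toList = [] from rfl, List.nil_append]
  rw [show ("\n" : String).toList = ['\n'] from rfl]
  rw [pvDropJoin (fun row => (PySem.Str.join "" row).toList) cols]
  simp [List.map_map, Function.comp_def]

theorem pvCore_eq (rows : List String) : pvACore rows = pvBCore rows := by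
  simp only [pvACore, pvBCore]
  set R := PySem.Str.len (rows.headD "") with hR
  -- A's expanded list is a flatMap of per-row groups
  have hE : rows.foldl (fun acc row =>
      let emptySpaceSum : Int :=
        row.toList.foldl (fun n ch => if ch = '.' then n + 1 else n) 0
      let rowList := row.toList.map (fun c => String.ofList [c])
      let acc2 := acc ++ [rowList]
      if emptySpaceSum = R then acc2 ++ [rowList] else acc2) []
      = rows.flatMap (pvGrp R) := by
    rw [PySem.List.foldl_congr_mem rows _
      (fun acc row => acc ++ pvGrp R row) []
      (by
        intro acc row _
        show (if row.toList.foldl (fun n ch => if ch = '.' then n + 1 else n) 0 = R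
            then (acc ++ [row.toList.map (fun c => String.ofList [c])]) ++ [row.toList.map (fun c => String.ofList [c])]
            else acc ++ [row.toList.map (fun c => String.ofList [c])]) = acc ++ pvGrp R row
        rw [← pvCountEq row]
        unfold pvGrp pvCl
        split <;> simp)]
    exact PySem.List.foldl_append_eq_flatMap (pvGrp R) rows []
  rw [hE, pvZipStar_eq (rows.flatMap (pvGrp R)), pvMinW_flat R rows]
  -- B's width is the minimum row length, as an Int
  have hWB : (match rows.map PySem.Str.len with
      | [] => (0 : Int)
      | w :: ws => ws.foldl min w) = ((pvWN rows : Nat) : Int) := by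
    cases rows with
    | nil => rfl
    | cons r t =>
        show (t.map PySem.Str.len).foldl min (PySem.Str.len r) = ((pvWN (r :: t) : Nat) : Int)
        rw [show t.map PySem.Str.len
            = (t.map (fun s : String => s.toList.length)).map (fun n : Nat => (n : Int)) from by
          simp [List.map_map, Function.comp_def, PySem.Str.len_eq]]
        rw [PySem.Str.len_eq, ← pvFoldlMin_cast]
        rw [show pvWN (r :: t)
            = (t.map (fun s : String => s.toList.length)).foldl min r.toList.length from by
          show t.foldl (fun m x => min m x.toList.length) r.toList.length = _
          rw [← List.foldl_map (f := fun s : String => s.toList.length) (g := min)]]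
  rw [hWB, PySem.List.foldl_append_singleton_eq_map]
  have hBC : (PySem.List.pyRange 0 ((pvWN rows : Nat) : Int) 1).map (fun j =>
        (rows.zip (rows.map (fun row => decide ((PySem.Str.count row "." : Int) = R)))).foldl
          (fun col rf =>
            if rf.2 = true then
              col ++ [String.ofList [(PySem.Str.pyGet? rf.1 j).getD ' ']] ++
                [String.ofList [(PySem.Str.pyGet? rf.1 j).getD ' ']]
            else col ++ [String.ofList [(PySem.Str.pyGet? rf.1 j).getD ' ']])
          [])
      = (List.range (pvWN rows)).map (fun j => (rows.flatMap (pvGrp R)).map (fun l => l.getD j "")) := by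
    apply List.ext_getElem
    · simp [PySem.List.length_pyRange_one]
    · intro j h1 h2
      simp only [List.getElem_map, List.getElem_range, PySem.List.getElem_pyRange_one, zero_add]
      have hj : j < pvWN rows := by simpa [PySem.List.length_pyRange_one] using h1
      rw [show rows.zip (rows.map (fun row => decide ((PySem.Str.count row "." : Int) = R)))
          = rows.map (fun r => (r, decide ((PySem.Str.count r "." : Int) = R))) from by
        simpa using List.zip_map' (f := id)
          (g := fun row => decide ((PySem.Str.count row "." : Int) = R)) (l := rows)]
      rw [List.foldl_map]
      have hinner := PySem.List.foldl_congr_mem rows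
        (fun (col : List String) (r : String) =>
          if decide ((PySem.Str.count r "." : Int) = R) = true then
            col ++ [String.ofList [(PySem.Str.pyGet? r (j : Int)).getD ' ']] ++
              [String.ofList [(PySem.Str.pyGet? r (j : Int)).getD ' ']]
          else col ++ [String.ofList [(PySem.Str.pyGet? r (j : Int)).getD ' ']])
        (fun (col : List String) (r : String) => col ++ (pvGrp R r).map (fun l => l.getD j "")) []
        (by
          intro col r hr
          have hjr : j < r.toList.length := lt_of_lt_of_le hj (pvWN_le rows r hr)
          dsimp only
          unfold pvGrp
          by_cases hf : (PySem.Str.count r "." : Int) = R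
          · rw [if_pos (by simpa using hf), if_pos hf]
            simp [pvClGet r j hjr, List.append_assoc]
          · rw [if_neg (by simpa using hf), if_neg hf]
            simp [pvClGet r j hjr])
      rw [hinner, PySem.List.foldl_append_eq_flatMap, List.nil_append, ← List.map_flatMap]
  rw [List.nil_append, hBC]
  exact Prod.ext_iff.mpr ⟨pvStr _, rfl⟩

-- ===== VERDICT (by name: the statement is the Claim_ definition above) =====
theorem addEmptySpaceAndTranspose_spec : Claim_equal_addEmptySpaceAndTranspose := by
  intro spaceMap _
  unfold Spec_addEmptySpaceAndTranspose addEmptySpaceAndTranspose addEmptySpaceAndTranspose_alt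
  exact pvCore_eq _
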